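-- pv_equiv track=rewrite | github.com/Ebuodinde/PR_SENTRY | performance.py | estimate_pr_size
-- ===== SOURCE A (Python) =====
-- from typing import Dict, List, Any, Optional
--
-- def estimate_pr_size(files: List[Dict[str, Any]]) -> str:
--     """
--     Estimate PR size category.
--
--     Args:
--         files: List of parsed files
--
--     Returns:
--         Size category: tiny, small, medium, large, xlarge
--     """
--     file_count = len(files)
--     total_lines = sum(len(f.get("changes", "").split("\n")) for f in files)
--
--     if file_count <= 3 and total_lines <= 100:
--         return "tiny"
--     elif file_count <= 10 and total_lines <= 500:
--         return "small"
--     elif file_count <= 30 and total_lines <= 2000: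
--         return "medium"
--     elif file_count <= 100 and total_lines <= 5000:
--         return "large"
--     else:
--         return "xlarge"
-- ===== SOURCE B (Python) =====
-- from typing import Dict, List, Any
--
-- _FILE_CUTS = [3, 10, 30, 100]
-- _LINE_CUTS = [100, 500, 2000, 5000]
-- _LABELS = ["tiny", "small", "medium", "large", "xlarge"]
--
--
-- def _bucket(x, cuts):
--     # index of the first bucket whose cutoff is not exceeded
--     # = number of cutoffs strictly below x
--     return sum(c < x for c in cuts)
--
--
-- def estimate_pr_size(files: List[Dict[str, Any]]) -> str:
--     line_counts = [len(f.get("changes", "").split("\n")) for f in files]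
--     fi = _bucket(len(files), _FILE_CUTS)
--     li = _bucket(sum(line_counts), _LINE_CUTS)
--     return _LABELS[max(fi, li)]
-- ===== Notes on version B (the rewrite author's own statement) =====
-- stated objective: alternative
-- what changed: Instead of A's four-branch if-elif cascade over conjoined conditions, B maps each metric independently to a bucket index (number of cutoffs strictly below the value) and returns the label at the max of the two indices; the line totals are gathered in a list comprehension and summed rather than folded inline.
import Mathlib
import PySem

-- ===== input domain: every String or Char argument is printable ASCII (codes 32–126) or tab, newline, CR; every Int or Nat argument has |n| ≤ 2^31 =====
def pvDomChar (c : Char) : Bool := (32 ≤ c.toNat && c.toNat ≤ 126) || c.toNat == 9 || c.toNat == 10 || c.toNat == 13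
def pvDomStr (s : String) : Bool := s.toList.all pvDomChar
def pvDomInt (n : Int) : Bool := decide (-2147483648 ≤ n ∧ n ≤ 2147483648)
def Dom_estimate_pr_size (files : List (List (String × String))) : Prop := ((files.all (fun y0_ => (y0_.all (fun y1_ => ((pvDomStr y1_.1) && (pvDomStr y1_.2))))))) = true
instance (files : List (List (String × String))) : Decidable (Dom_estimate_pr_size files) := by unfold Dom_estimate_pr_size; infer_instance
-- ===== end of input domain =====

-- B classifies by mapping each metric independently to a bucket index (count of cutoffs below it)
-- and taking the label at the max of the two indices, instead of A's four-branch if-elif cascade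
-- (alternative decomposition; return value only, no mutation).

-- ===== PORT A =====
def estimate_pr_size (files : List (List (String × String))) : String :=
  let file_count : Int := files.length
  let total_lines : Int :=
    files.foldl
      (fun acc f =>
        acc + (((PySem.Str.split? ((PySem.Dict.mk f).getD "changes" "") "\n").getD []).length : Int)) 0
  if file_count ≤ 3 ∧ total_lines ≤ 100 then "tiny"
  else if file_count ≤ 10 ∧ total_lines ≤ 500 then "small"
  else if file_count ≤ 30 ∧ total_lines ≤ 2000 then "medium"
  else if file_count ≤ 100 ∧ total_lines ≤ 5000 then "large"
  else "xlarge"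

-- ===== PORT B =====
-- _bucket(x, cuts) = sum(c < x for c in cuts)
def pvBucket (x : Int) (cuts : List Int) : Int :=
  cuts.foldl (fun acc c => acc + (if c < x then 1 else 0)) 0

def estimate_pr_size_alt (files : List (List (String × String))) : String :=
  let line_counts : List Int :=
    files.map
      (fun f => (((PySem.Str.split? ((PySem.Dict.mk f).getD "changes" "") "\n").getD []).length : Int))
  let fi : Int := pvBucket files.length [3, 10, 30, 100]
  let li : Int := pvBucket line_counts.sum [100, 500, 2000, 5000]
  -- _LABELS[max(fi, li)]: the index is always 0..4, so pyGet? never misses; .getD "" totalizes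
  (PySem.List.pyGet? ["tiny", "small", "medium", "large", "xlarge"] (max fi li)).getD ""

-- ===== PRECONDITION & SPEC =====
def Spec_estimate_pr_size (files : List (List (String × String))) (out : String) : Prop := out = estimate_pr_size_alt files
instance (files : List (List (String × String))) (out : String) : Decidable (Spec_estimate_pr_size files out) := by unfold Spec_estimate_pr_size; infer_instance

-- ===== CLAIM (what is proved, stated in full; the proofs are below) =====
def Claim_equal_estimate_pr_size : Prop := ∀ (files : List (List (String × String))), Dom_estimate_pr_size files → Spec_estimate_pr_size files (estimate_pr_size files)

-- ===== LEMMAS AND PROOFS =====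
-- A's inline fold of the per-file line counts equals summing B's mapped list
theorem fold_eq_map_sum (files : List (List (String × String))) :
    files.foldl
      (fun acc f =>
        acc + (((PySem.Str.split? ((PySem.Dict.mk f).getD "changes" "") "\n").getD []).length : Int)) 0
    = (files.map
        (fun f => (((PySem.Str.split? ((PySem.Dict.mk f).getD "changes" "") "\n").getD []).length : Int))).sum := by
  rw [← List.foldl_map (f := fun f => (((PySem.Str.split? ((PySem.Dict.mk f).getD "changes" "") "\n").getD []).length : Int))
        (g := fun acc x => acc + x)]
  exact List.sum_eq_foldl.symm

-- each bucket fold evaluates to a nested-if bucket index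
theorem bucket_fc (fc : Int) :
    pvBucket fc [3, 10, 30, 100]
      = (if fc ≤ 3 then 0 else if fc ≤ 10 then 1 else if fc ≤ 30 then 2 else if fc ≤ 100 then 3 else 4) := by
  simp only [pvBucket, List.foldl]
  split_ifs <;> omega

theorem bucket_tl (tl : Int) :
    pvBucket tl [100, 500, 2000, 5000]
      = (if tl ≤ 100 then 0 else if tl ≤ 500 then 1 else if tl ≤ 2000 then 2 else if tl ≤ 5000 then 3 else 4) := by
  simp only [pvBucket, List.foldl]
  split_ifs <;> omega

-- the bucket/max classification coincides with the threshold cascade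
theorem cascade_eq_bucket (fc tl : Int) :
    (if fc ≤ 3 ∧ tl ≤ 100 then "tiny"
     else if fc ≤ 10 ∧ tl ≤ 500 then "small"
     else if fc ≤ 30 ∧ tl ≤ 2000 then "medium"
     else if fc ≤ 100 ∧ tl ≤ 5000 then "large"
     else "xlarge")
    = (PySem.List.pyGet? ["tiny", "small", "medium", "large", "xlarge"]
        (max (pvBucket fc [3, 10, 30, 100]) (pvBucket tl [100, 500, 2000, 5000]))).getD "" := by
  rw [bucket_fc, bucket_tl]
  split_ifs <;> first | rfl | omega

-- ===== VERDICT (by name: the statement is the Claim_ definition above) =====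
theorem estimate_pr_size_spec : Claim_equal_estimate_pr_size := by
  intro files _
  unfold Spec_estimate_pr_size estimate_pr_size estimate_pr_size_alt
  rw [fold_eq_map_sum, cascade_eq_bucket]
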